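-- pv_equiv track=rewrite | github.com/CodinaFJ/AdventOfCode_2025 | day02/day02.py | get_div_num
-- ===== SOURCE A (Python) =====
-- def get_div_num(nbr):
--     res = 1
--     num = nbr
--     while num > 0:
--         num = num // 10
--         res *= 10
--     res = res + 1
--     return(res)
-- ===== SOURCE B (Python) =====
-- def get_div_num(nbr):
--     # closed form: smallest power of 10 with more digits than nbr, plus 1
--     return 10 ** len(str(nbr)) + 1 if nbr > 0 else 2
-- ===== Notes on version B (the rewrite author's own statement) =====
-- stated objective: simpler
-- what changed: Replaces the per-digit divide-and-multiply while loop with the closed form 10 ** len(str(nbr)) + 1 (2 when nbr <= 0, where the loop never runs).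
import Mathlib
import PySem

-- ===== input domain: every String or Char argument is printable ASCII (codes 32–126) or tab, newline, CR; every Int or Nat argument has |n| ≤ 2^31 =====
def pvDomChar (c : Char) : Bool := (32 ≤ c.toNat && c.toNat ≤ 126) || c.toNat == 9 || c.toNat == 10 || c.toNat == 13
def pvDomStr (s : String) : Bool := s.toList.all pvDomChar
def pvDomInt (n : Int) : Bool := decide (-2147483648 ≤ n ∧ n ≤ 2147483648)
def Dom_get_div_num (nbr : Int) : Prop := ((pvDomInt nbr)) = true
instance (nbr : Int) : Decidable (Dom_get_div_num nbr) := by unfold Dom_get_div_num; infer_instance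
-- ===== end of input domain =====

-- B replaces A's per-digit divide-and-multiply while loop by the closed form 10 ** len(str(nbr)) + 1 (2 when nbr <= 0).


-- ===== PORT A =====
-- the 'while num > 0: num //= 10; res *= 10' loop, step for step
def getDivNumLoop (num res : Int) : Int :=
  if num > 0 then getDivNumLoop (PySem.Int.floordiv num 10) (res * 10) else res
termination_by num.toNat
decreasing_by
  rw [PySem.Int.floordiv_eq_ediv_of_pos (by norm_num)]
  omega

def get_div_num (nbr : Int) : Int := getDivNumLoop nbr 1 + 1

-- ===== PORT B =====
-- 10 ** len(str(nbr)) + 1 if nbr > 0 else 2  (exponent is the nonnegative string length, hence .toNat is exact)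
def get_div_num_alt (nbr : Int) : Int :=
  if nbr > 0 then 10 ^ (PySem.Str.len (PySem.Int.toStr nbr)).toNat + 1 else 2

-- ===== PRECONDITION & SPEC =====
def Spec_get_div_num (nbr : Int) (out : Int) : Prop := out = get_div_num_alt nbr
instance (nbr : Int) (out : Int) : Decidable (Spec_get_div_num nbr out) := by unfold Spec_get_div_num; infer_instance

-- ===== CLAIM (what is proved, stated in full; the proofs are below) =====
def Claim_equal_get_div_num : Prop := ∀ (nbr : Int), Dom_get_div_num nbr → Spec_get_div_num nbr (get_div_num nbr)

-- ===== LEMMAS AND PROOFS =====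

lemma tdc_len : ∀ (f n : Nat) (acc : List Char), 0 < n → n ≤ f →
    (Nat.toDigitsCore 10 f n acc).length = Nat.log 10 n + 1 + acc.length := by
  intro f
  induction f with
  | zero => intro n acc hn hf; omega
  | succ f ih =>
    intro n acc hn hf
    simp only [Nat.toDigitsCore]
    by_cases h : n / 10 = 0
    · have hlt : n < 10 := by omega
      have : Nat.log 10 n = 0 := Nat.log_eq_zero_iff.mpr (Or.inl hlt)
      simp [h, this]; omega
    · have h10 : 10 ≤ n := by
        by_contra hc; exact h (Nat.div_eq_of_lt (by omega))
      have hdpos : 0 < n / 10 := Nat.pos_of_ne_zero h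
      have hdle : n / 10 ≤ f := by
        have := Nat.div_lt_self hn (by norm_num : 1 < 10); omega
      have hlog : Nat.log 10 (n / 10) = Nat.log 10 n - 1 := Nat.log_div_base 10 n
      have hlp : 0 < Nat.log 10 n := Nat.log_pos (by norm_num) h10
      rw [if_neg h, ih (n / 10) _ hdpos hdle, hlog]
      simp only [List.length_cons]
      omega

lemma toChars_len_pos (n : Nat) (hn : 0 < n) :
    (PySem.Int.toChars (n : Int)).length = Nat.log 10 n + 1 := by
  have h1 : ¬ ((n : Int) < 0) := by omega
  simp only [PySem.Int.toChars, if_neg h1, Int.toNat_natCast, Nat.toDigits]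
  simpa using tdc_len (n + 1) n [] hn (by omega)

lemma loop_pow (n : Nat) (hn : 0 < n) : ∀ res : Int,
    getDivNumLoop (n : Int) res = res * 10 ^ (Nat.log 10 n + 1) := by
  induction n using Nat.strong_induction_on with
  | _ n ih =>
    intro res
    rw [getDivNumLoop]
    have hpos : (0 : Int) < (n : Int) := by exact_mod_cast hn
    rw [if_pos hpos]
    have hfd : PySem.Int.floordiv (n : Int) 10 = ((n / 10 : Nat) : Int) := by
      exact_mod_cast PySem.Int.floordiv_natCast n 10
    rw [hfd]
    by_cases h : n / 10 = 0
    · have hlt : n < 10 := by omega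
      have hl : Nat.log 10 n = 0 := Nat.log_eq_zero_iff.mpr (Or.inl hlt)
      rw [h, hl]
      rw [getDivNumLoop]
      norm_num
    · have h10 : 10 ≤ n := by
        by_contra hc; exact h (Nat.div_eq_of_lt (by omega))
      have hdpos : 0 < n / 10 := Nat.pos_of_ne_zero h
      have hdlt : n / 10 < n := Nat.div_lt_self hn (by norm_num)
      have hlog : Nat.log 10 (n / 10) = Nat.log 10 n - 1 := Nat.log_div_base 10 n
      have hlp : 0 < Nat.log 10 n := Nat.log_pos (by norm_num) h10
      rw [ih (n / 10) hdlt hdpos (res * 10), hlog]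
      have : Nat.log 10 n - 1 + 1 = Nat.log 10 n := by omega
      rw [this]
      rw [pow_succ]
      ring

-- ===== VERDICT (by name: the statement is the Claim_ definition above) =====
theorem get_div_num_spec : Claim_equal_get_div_num := by
  intro nbr _
  unfold Spec_get_div_num get_div_num get_div_num_alt
  by_cases h : nbr > 0
  · rw [if_pos h]
    obtain ⟨n, rfl⟩ : ∃ n : Nat, nbr = (n : Int) := ⟨nbr.toNat, by omega⟩
    have hn : 0 < n := by exact_mod_cast h
    rw [loop_pow n hn 1]
    rw [PySem.Str.len_eq, PySem.Int.toList_toStr, toChars_len_pos n hn]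
    simp
  · rw [if_neg h, getDivNumLoop, if_neg h]
    norm_num
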